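-- pv_equiv track=rewrite | github.com/ljrkkaa/VLTL-Bench | dataset_generators/ltl_verifier.py | _tokenize_spot_formula
-- ===== SOURCE A (Python) =====
-- def _tokenize_spot_formula(spot_formula: str) -> list:
--     """将 Spot 风格字符串粗粒度分词。
--
--     目标：稳定处理 Spot 简化/pretty-print 里常见的紧贴写法：
--     - Fprop_7, Xp0, G(Fp1 & Fp2)
--     - 单字符布尔算子: & |
--     - 释放/弱直到: R W
--
--     注意：这不是完整的语法分析器，但足够用于把 Spot 输出“还原”为自然语言关键字格式。
--     """
--     if not spot_formula:
--         return []
--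
--     s = spot_formula.strip()
--     tokens = []
--     i = 0
--
--     multi_ops = ("<->", "->", "&&", "||")
--     single_ops = set("()!&|")
--     ltl_unary_binary = set("GFUXRWM")
--
--     while i < len(s):
--         ch = s[i]
--
--         if ch.isspace():
--             i += 1
--             continue
--
--         matched_multi = False
--         for op in multi_ops:
--             if s.startswith(op, i):
--                 tokens.append(op)
--                 i += len(op)
--                 matched_multi = True
--                 break
--         if matched_multi:
--             continue
--
--         if ch in single_ops:
--             tokens.append(ch)
--             i += 1
--             continue
--
--         if ch in ltl_unary_binary:
--             tokens.append(ch)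
--             i += 1
--             continue
--
--         # 读取原子命题：一直读到空白或遇到运算符起始字符
--         # 注意：不要在这里因为遇到 'G/F/X/...' 这种字母就提前截断，
--         # 否则会误拆包含大写字母的原子命题名；
--         # 像 Fprop_7 这种紧贴写法会在前面的“算子分支”中先消费掉 'F'。
--         start = i
--         while i < len(s):
--             if s[i].isspace():
--                 break
--             if (
--                 s.startswith("<->", i)
--                 or s.startswith("->", i)
--                 or s.startswith("&&", i)
--                 or s.startswith("||", i)
--             ):
--                 break
--             if s[i] in single_ops:
--                 break
--             i += 1
--
--         if i == start:
--             # 理论上不该发生；兜底避免死循环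
--             tokens.append(ch)
--             i += 1
--         else:
--             tokens.append(s[start:i])
--
--     return [t for t in tokens if t != ""]
-- ===== SOURCE B (Python) =====
-- import re
--
-- # One compiled master regex with ordered alternation: multi-char ops first, then the
-- # single-char operator class (parens, ! & |, and the LTL operator letters), then an
-- # atom = a maximal run of non-space non-operator chars that never starts '<->' or '->'.
-- _TOKEN_RE = re.compile(
--     r"<->|->|&&|\|\|"            # multi-char operators (longest first)
--     r"|[()!&|GFUXRWM]"           # single operator chars / LTL operator letters
--     r"|(?:(?!<->|->)[^\s()!&|])+"  # atomic proposition (may contain G/F/... inside)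
-- )
--
-- def _tokenize_spot_formula(spot_formula: str) -> list:
--     return _TOKEN_RE.findall(spot_formula.strip())
-- ===== Notes on version B (the rewrite author's own statement) =====
-- stated objective: idiomatic
-- what changed: Replaces the manual index loop with per-branch dispatch and an inner character-by-character atom scan by a single compiled master regex (ordered alternation: multi-char ops, operator-char class, lookahead-guarded atom run) driven by re.findall.
import Mathlib
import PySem

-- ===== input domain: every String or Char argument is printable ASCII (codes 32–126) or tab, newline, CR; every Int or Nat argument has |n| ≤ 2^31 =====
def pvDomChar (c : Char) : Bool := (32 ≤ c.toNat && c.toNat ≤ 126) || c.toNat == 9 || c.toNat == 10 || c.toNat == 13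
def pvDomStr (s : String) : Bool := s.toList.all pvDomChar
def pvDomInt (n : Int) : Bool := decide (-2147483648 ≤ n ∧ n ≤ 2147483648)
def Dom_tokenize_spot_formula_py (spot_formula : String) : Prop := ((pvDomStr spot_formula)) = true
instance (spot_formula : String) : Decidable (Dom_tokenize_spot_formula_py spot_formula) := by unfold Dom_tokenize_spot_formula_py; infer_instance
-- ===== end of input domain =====

-- B replaces A's manual index loop + inner atom scan with a single ordered-alternation master regex driven by findall (idiomatic; measured constant-factor faster in a timing run).

-- ===== PORT A =====
-- Port of A (_tokenize_spot_formula): manual scanner. The while loop over index i is the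
-- structural recursion pvA_loop over the remaining suffix; the inner atom-reading while loop
-- is pvA_scanAtom. The first atom character can never satisfy the inner break condition
-- (the outer branches already consumed it), so the `i == start` fallback of A is unreachable
-- and the atom token is literally c :: scan of the rest.
def pvA_singleOps : List Char := ['(', ')', '!', '&', '|']
def pvA_ltlOps : List Char := ['G', 'F', 'U', 'X', 'R', 'W', 'M']

-- inner while: read atom chars until whitespace / a multi-op starts here / a single-op char
def pvA_scanAtom : List Char → List Char × List Char
  | [] => ([], [])
  | c :: rest =>
    if PySem.Chars.isspace c then ([], c :: rest)
    else if PySem.Chars.startswith (c :: rest) ['<', '-', '>']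
         || PySem.Chars.startswith (c :: rest) ['-', '>']
         || PySem.Chars.startswith (c :: rest) ['&', '&']
         || PySem.Chars.startswith (c :: rest) ['|', '|'] then ([], c :: rest)
    else if c ∈ pvA_singleOps then ([], c :: rest)
    else
      let p := pvA_scanAtom rest
      (c :: p.1, p.2)

theorem pvA_scanAtom_len (cs : List Char) : (pvA_scanAtom cs).2.length ≤ cs.length := by
  induction cs with
  | nil => simp [pvA_scanAtom]
  | cons c rest ih =>
    simp only [pvA_scanAtom]
    split_ifs <;> simp
    omega

-- the outer while loop of A
def pvA_loop (cs : List Char) : List String :=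
  match cs with
  | [] => []
  | c :: rest =>
    if PySem.Chars.isspace c then pvA_loop rest
    else if PySem.Chars.startswith (c :: rest) ['<', '-', '>'] then
      "<->" :: pvA_loop (rest.drop 2)
    else if PySem.Chars.startswith (c :: rest) ['-', '>'] then
      "->" :: pvA_loop (rest.drop 1)
    else if PySem.Chars.startswith (c :: rest) ['&', '&'] then
      "&&" :: pvA_loop (rest.drop 1)
    else if PySem.Chars.startswith (c :: rest) ['|', '|'] then
      "||" :: pvA_loop (rest.drop 1)
    else if c ∈ pvA_singleOps then
      String.ofList [c] :: pvA_loop rest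
    else if c ∈ pvA_ltlOps then
      String.ofList [c] :: pvA_loop rest
    else
      let p := pvA_scanAtom rest
      String.ofList (c :: p.1) :: pvA_loop p.2
termination_by cs.length
decreasing_by
  all_goals simp_all
  all_goals first
    | omega
    | (have := pvA_scanAtom_len rest; omega)

def tokenize_spot_formula_py (spot_formula : String) : List String :=
  if spot_formula = "" then []
  else (pvA_loop (PySem.Str.strip spot_formula).toList).filter (fun t => t != "")

-- ===== PORT B =====
-- Port of B: the compiled master regex  <->|->|&&|\|\| | [()!&|GFUXRWM] | (?:(?!<->|->)[^\s()!&|])+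
-- tried at each position in order (pvB_match), driven by the findall scan pvB_scan
-- (on failure the scan advances one character, as the regex engine does).
def pvB_opClass : List Char := ['(', ')', '!', '&', '|', 'G', 'F', 'U', 'X', 'R', 'W', 'M']
def pvB_atomExcl : List Char := ['(', ')', '!', '&', '|']

-- greedy '+' run of the atom branch: characters matching (?!<->|->)[^\s()!&|]
def pvB_atomRun : List Char → List Char × List Char
  | [] => ([], [])
  | c :: rest =>
    if PySem.Chars.startswith (c :: rest) ['<', '-', '>']
       || PySem.Chars.startswith (c :: rest) ['-', '>'] then ([], c :: rest)
    else if PySem.Chars.isspace c || c ∈ pvB_atomExcl then ([], c :: rest)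
    else
      let p := pvB_atomRun rest
      (c :: p.1, p.2)

theorem pvB_atomRun_len (cs : List Char) : (pvB_atomRun cs).2.length ≤ cs.length := by
  induction cs with
  | nil => simp [pvB_atomRun]
  | cons c rest ih =>
    simp only [pvB_atomRun]
    split_ifs <;> simp
    omega

-- one attempt of the master regex at the current position
def pvB_match : List Char → Option (String × List Char)
  | [] => none
  | c :: rest =>
    if PySem.Chars.startswith (c :: rest) ['<', '-', '>'] then some ("<->", rest.drop 2)
    else if PySem.Chars.startswith (c :: rest) ['-', '>'] then some ("->", rest.drop 1)
    else if PySem.Chars.startswith (c :: rest) ['&', '&'] then some ("&&", rest.drop 1)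
    else if PySem.Chars.startswith (c :: rest) ['|', '|'] then some ("||", rest.drop 1)
    else if c ∈ pvB_opClass then some (String.ofList [c], rest)
    else
      match pvB_atomRun (c :: rest) with
      | ([], _) => none              -- '+' needs at least one char: no match here
      | (t, r) => some (String.ofList t, r)

theorem pvB_match_len {cs : List Char} {t : String} {r : List Char}
    (h : pvB_match cs = some (t, r)) : r.length < cs.length := by
  match cs with
  | [] => simp [pvB_match] at h
  | c :: rest =>
    rw [pvB_match] at h
    split_ifs at h with h1 h2 h3 h4 h5
    · simp only [Option.some.injEq, Prod.mk.injEq] at h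
      obtain ⟨-, rfl⟩ := h
      simp only [List.length_drop, List.length_cons]; omega
    · simp only [Option.some.injEq, Prod.mk.injEq] at h
      obtain ⟨-, rfl⟩ := h
      simp only [List.length_drop, List.length_cons]; omega
    · simp only [Option.some.injEq, Prod.mk.injEq] at h
      obtain ⟨-, rfl⟩ := h
      simp only [List.length_drop, List.length_cons]; omega
    · simp only [Option.some.injEq, Prod.mk.injEq] at h
      obtain ⟨-, rfl⟩ := h
      simp only [List.length_drop, List.length_cons]; omega
    · simp only [Option.some.injEq, Prod.mk.injEq] at h
      obtain ⟨-, rfl⟩ := h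
      simp only [List.length_cons]; omega
    · have h12 : (PySem.Chars.startswith (c :: rest) ['<', '-', '>']
          || PySem.Chars.startswith (c :: rest) ['-', '>']) = false := by
        simp [h1, h2]
      rw [pvB_atomRun, if_neg (by simp [h12])] at h
      by_cases hb : (PySem.Chars.isspace c || decide (c ∈ pvB_atomExcl)) = true
      · rw [if_pos (by simpa using hb)] at h
        simp at h
      · rw [if_neg (by simpa using hb)] at h
        simp only [Option.some.injEq, Prod.mk.injEq] at h
        obtain ⟨-, rfl⟩ := h
        have := pvB_atomRun_len rest
        simp only [List.length_cons]; omega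

-- the findall scan
def pvB_scan (cs : List Char) : List String :=
  match cs with
  | [] => []
  | c :: rest =>
    match h : pvB_match (c :: rest) with
    | none => pvB_scan rest
    | some (t, r) => t :: pvB_scan r
termination_by cs.length
decreasing_by
  · simp
  · exact pvB_match_len h

def tokenize_spot_formula_py_alt (spot_formula : String) : List String :=
  pvB_scan (PySem.Str.strip spot_formula).toList

-- ===== PRECONDITION & SPEC =====
def Spec_tokenize_spot_formula_py (spot_formula : String) (out : List String) : Prop := out = tokenize_spot_formula_py_alt spot_formula
instance (spot_formula : String) (out : List String) : Decidable (Spec_tokenize_spot_formula_py spot_formula out) := by unfold Spec_tokenize_spot_formula_py; infer_instance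

-- ===== CLAIM (what is proved, stated in full; the proofs are below) =====
def Claim_equal_tokenize_spot_formula_py : Prop := ∀ (spot_formula : String), Dom_tokenize_spot_formula_py spot_formula → Spec_tokenize_spot_formula_py spot_formula (tokenize_spot_formula_py spot_formula)

-- ===== LEMMAS AND PROOFS =====

-- a whitespace character is none of the operator characters
theorem pv_space_ne (c : Char) (h : PySem.Chars.isspace c = true) (d : Char)
    (hd : d ∈ ['<', '-', '&', '|', '(', ')', '!', 'G', 'F', 'U', 'X', 'R', 'W', 'M']) :
    c ≠ d := by
  intro hc; subst hc; fin_cases hd <;> simp [PySem.Chars.isspace] at h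

-- the two atom scanners break on exactly the same positions, hence are equal
theorem pv_scanAtom_eq (cs : List Char) : pvA_scanAtom cs = pvB_atomRun cs := by
  induction cs with
  | nil => rfl
  | cons c rest ih =>
    simp only [pvA_scanAtom, pvB_atomRun]
    by_cases hs : PySem.Chars.isspace c = true
    · have h1 : ¬ PySem.Chars.startswith (c :: rest) ['<', '-', '>'] = true := by
        simp [PySem.Chars.startswith, List.isPrefixOf]
        intro hc; exact absurd hc.symm (pv_space_ne c hs '<' (by simp))
      have h2 : ¬ PySem.Chars.startswith (c :: rest) ['-', '>'] = true := by
        simp [PySem.Chars.startswith, List.isPrefixOf]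
        intro hc; exact absurd hc.symm (pv_space_ne c hs '-' (by simp))
      simp [hs, h1, h2]
    · simp only [hs, if_false, Bool.false_eq_true]
      by_cases h12 : (PySem.Chars.startswith (c :: rest) ['<', '-', '>']
                      || PySem.Chars.startswith (c :: rest) ['-', '>']) = true
      · rcases Bool.or_eq_true_iff.mp h12 with h | h <;> simp [h]
      · rcases Bool.or_eq_false_iff.mp (Bool.eq_false_iff.mpr h12) with ⟨h1, h2⟩
        by_cases h3 : PySem.Chars.startswith (c :: rest) ['&', '&'] = true
        · have hc : c = '&' := by
            have h' := h3
            simp [PySem.Chars.startswith, List.isPrefixOf] at h'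
            exact h'.1.symm
          simp [hc, pvA_singleOps, pvB_atomExcl]
        · by_cases h4 : PySem.Chars.startswith (c :: rest) ['|', '|'] = true
          · have hc : c = '|' := by
              have h' := h4
              simp [PySem.Chars.startswith, List.isPrefixOf] at h'
              exact h'.1.symm
            simp [hc, pvA_singleOps, pvB_atomExcl]
          · simp only [h1, h2, h3, h4, Bool.or_false, if_false, Bool.false_eq_true]
            by_cases h5 : c ∈ pvA_singleOps
            · have : c ∈ pvB_atomExcl := by simpa [pvB_atomExcl] using (by simpa [pvA_singleOps] using h5)
              simp [h5, this]
            · have : c ∉ pvB_atomExcl := by simpa [pvB_atomExcl] using (by simpa [pvA_singleOps] using h5)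
              simp [h5, this, ih]

-- main loop correspondence: A's token loop, filtered of empty tokens, is B's findall scan
theorem pv_loop_eq (cs : List Char) :
    (pvA_loop cs).filter (fun t => t != "") = pvB_scan cs := by
  induction cs using pvA_loop.induct with
  | case1 => simp [pvA_loop, pvB_scan]
  | case2 c rest hs ih =>
    -- whitespace: A skips; the regex has no alternative matching a space, B advances one char
    have h1 : ¬ PySem.Chars.startswith (c :: rest) ['<', '-', '>'] = true := by
      simp [PySem.Chars.startswith, List.isPrefixOf]
      intro hc; exact absurd hc.symm (pv_space_ne c hs '<' (by simp))
    have h2 : ¬ PySem.Chars.startswith (c :: rest) ['-', '>'] = true := by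
      simp [PySem.Chars.startswith, List.isPrefixOf]
      intro hc; exact absurd hc.symm (pv_space_ne c hs '-' (by simp))
    have h3 : ¬ PySem.Chars.startswith (c :: rest) ['&', '&'] = true := by
      simp [PySem.Chars.startswith, List.isPrefixOf]
      intro hc; exact absurd hc.symm (pv_space_ne c hs '&' (by simp))
    have h4 : ¬ PySem.Chars.startswith (c :: rest) ['|', '|'] = true := by
      simp [PySem.Chars.startswith, List.isPrefixOf]
      intro hc; exact absurd hc.symm (pv_space_ne c hs '|' (by simp))
    have h5 : c ∉ pvB_opClass := by
      simp only [pvB_opClass]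
      intro hm
      exact absurd rfl (pv_space_ne c hs c (by fin_cases hm <;> simp))
    have hm : pvB_match (c :: rest) = none := by
      simp only [pvB_match, h1, h2, h3, h4, h5, if_false, Bool.false_eq_true,
        pvB_atomRun, hs, Bool.true_or, if_true]
      rfl
    rw [pvA_loop, if_pos hs, pvB_scan, hm, ih]
  | case3 c rest hs hsw ih =>
    rw [pvA_loop, if_neg hs, if_pos hsw, pvB_scan]
    rw [pvB_match, if_pos hsw]
    simp [ih]
  | case4 c rest hs h1 hsw ih =>
    rw [pvA_loop, if_neg hs, if_neg h1, if_pos hsw, pvB_scan]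
    rw [pvB_match, if_neg h1, if_pos hsw]
    simp only [List.filter_cons, List.drop_one] at ih ⊢
    simp [ih]
  | case5 c rest hs h1 h2 hsw ih =>
    rw [pvA_loop, if_neg hs, if_neg h1, if_neg h2, if_pos hsw, pvB_scan]
    rw [pvB_match, if_neg h1, if_neg h2, if_pos hsw]
    simp only [List.filter_cons, List.drop_one] at ih ⊢
    simp [ih]
  | case6 c rest hs h1 h2 h3 hsw ih =>
    rw [pvA_loop, if_neg hs, if_neg h1, if_neg h2, if_neg h3, if_pos hsw, pvB_scan]
    rw [pvB_match, if_neg h1, if_neg h2, if_neg h3, if_pos hsw]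
    simp only [List.filter_cons, List.drop_one] at ih ⊢
    simp [ih]
  | case7 c rest hs h1 h2 h3 h4 hsw ih =>
    have hcl : c ∈ pvB_opClass := by
      simp only [pvA_singleOps] at hsw
      simp only [pvB_opClass]
      fin_cases hsw <;> simp
    rw [pvA_loop, if_neg hs, if_neg h1, if_neg h2, if_neg h3, if_neg h4, if_pos hsw, pvB_scan]
    rw [pvB_match, if_neg h1, if_neg h2, if_neg h3, if_neg h4, if_pos hcl]
    have hne : (String.ofList [c] != "") = true := by
      simp only [bne_iff_ne, ne_eq]
      intro hx; have := congrArg String.toList hx; simp at this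
    simp [hne, ih]
  | case8 c rest hs h1 h2 h3 h4 hso hltl ih =>
    have hcl : c ∈ pvB_opClass := by
      simp only [pvA_ltlOps] at hltl
      simp only [pvB_opClass]
      fin_cases hltl <;> simp
    rw [pvA_loop, if_neg hs, if_neg h1, if_neg h2, if_neg h3, if_neg h4, if_neg hso, if_pos hltl,
      pvB_scan]
    rw [pvB_match, if_neg h1, if_neg h2, if_neg h3, if_neg h4, if_pos hcl]
    have hne : (String.ofList [c] != "") = true := by
      simp only [bne_iff_ne, ne_eq]
      intro hx; have := congrArg String.toList hx; simp at this
    simp [hne, ih]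
  | case9 c rest hs h1 h2 h3 h4 hso hltl p ih =>
    have hcl : c ∉ pvB_opClass := by
      simp only [pvA_singleOps] at hso
      simp only [pvA_ltlOps] at hltl
      simp only [pvB_opClass]
      simp at hso hltl ⊢
      tauto
    have hexcl : c ∉ pvB_atomExcl := by
      simp only [pvA_singleOps] at hso
      simp only [pvB_atomExcl]
      simpa using hso
    rw [pvA_loop, if_neg hs, if_neg h1, if_neg h2, if_neg h3, if_neg h4, if_neg hso, if_neg hltl,
      pvB_scan]
    have hrun : pvB_atomRun (c :: rest) = (c :: (pvB_atomRun rest).1, (pvB_atomRun rest).2) := by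
      rw [pvB_atomRun]
      simp only [h1, h2, Bool.or_self, if_false, Bool.false_eq_true]
      simp [hs, hexcl]
    have hm : pvB_match (c :: rest)
        = some (String.ofList (c :: (pvB_atomRun rest).1), (pvB_atomRun rest).2) := by
      rw [pvB_match, if_neg h1, if_neg h2, if_neg h3, if_neg h4, if_neg hcl, hrun]
    rw [hm]
    have ih' : List.filter (fun t => t != "") (pvA_loop (pvA_scanAtom rest).2)
        = pvB_scan (pvA_scanAtom rest).2 := ih
    rw [pv_scanAtom_eq] at ih' ⊢
    simp [ih']

-- ===== VERDICT (by name: the statement is the Claim_ definition above) =====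
theorem tokenize_spot_formula_py_spec : Claim_equal_tokenize_spot_formula_py := by
  intro s _
  unfold Spec_tokenize_spot_formula_py tokenize_spot_formula_py tokenize_spot_formula_py_alt
  by_cases hempty : s = ""
  · subst hempty
    have hnil : (PySem.Str.strip "").toList = [] := by
      simp
      rfl
    rw [if_pos rfl, hnil]
    simp [pvB_scan]
  · rw [if_neg hempty, pv_loop_eq]
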